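-- pv_equiv track=rewrite | github.com/Ghenghis/Hyperspin-Toolkit | engines/game_recommender.py | classify_era
-- ===== SOURCE A (Python) =====
-- from typing import Any, Dict, List, Optional, Set, Tuple
--
-- ERA_RANGES = {
--     "retro_early": (1970, 1984),
--     "retro_golden": (1985, 1992),
--     "16bit_era": (1993, 1996),
--     "3d_revolution": (1997, 2001),
--     "modern_classic": (2002, 2010),
--     "modern": (2011, 2025),
-- }
--
-- SYSTEM_GENERATIONS: Dict[str, str] = {
--     "Atari 2600": "retro_early", "Atari 5200": "retro_early",
--     "ColecoVision": "retro_early", "Intellivision": "retro_early",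
--     "NES": "retro_golden", "Master System": "retro_golden",
--     "Game Boy": "retro_golden", "Atari 7800": "retro_golden",
--     "SNES": "16bit_era", "Genesis": "16bit_era", "Mega Drive": "16bit_era",
--     "TurboGrafx-16": "16bit_era", "Neo Geo": "16bit_era",
--     "Game Boy Color": "16bit_era", "Game Gear": "16bit_era",
--     "Sega CD": "16bit_era", "Atari Lynx": "16bit_era",
--     "PlayStation": "3d_revolution", "N64": "3d_revolution",
--     "Saturn": "3d_revolution", "Dreamcast": "3d_revolution",
--     "GBA": "3d_revolution", "WonderSwan": "3d_revolution",
--     "PS2": "modern_classic", "GameCube": "modern_classic",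
--     "Xbox": "modern_classic", "NDS": "modern_classic",
--     "PSP": "modern_classic", "Wii": "modern_classic",
--     "3DO": "3d_revolution", "Jaguar": "3d_revolution",
--     "Arcade": "retro_golden", "MAME": "retro_golden",
-- }
--
-- def classify_era(year_str: str, system: str = "") -> str:
--     """Classify a game into an era based on year or system."""
--     if year_str:
--         try:
--             year = int(year_str[:4])
--             for era, (start, end) in ERA_RANGES.items():
--                 if start <= year <= end:
--                     return era
--         except (ValueError, IndexError):
--             pass
--     return SYSTEM_GENERATIONS.get(system, "unknown")
-- ===== SOURCE B (Python) =====
-- SYSTEM_GENERATIONS = {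
--     "Atari 2600": "retro_early", "Atari 5200": "retro_early",
--     "ColecoVision": "retro_early", "Intellivision": "retro_early",
--     "NES": "retro_golden", "Master System": "retro_golden",
--     "Game Boy": "retro_golden", "Atari 7800": "retro_golden",
--     "SNES": "16bit_era", "Genesis": "16bit_era", "Mega Drive": "16bit_era",
--     "TurboGrafx-16": "16bit_era", "Neo Geo": "16bit_era",
--     "Game Boy Color": "16bit_era", "Game Gear": "16bit_era",
--     "Sega CD": "16bit_era", "Atari Lynx": "16bit_era",
--     "PlayStation": "3d_revolution", "N64": "3d_revolution",
--     "Saturn": "3d_revolution", "Dreamcast": "3d_revolution",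
--     "GBA": "3d_revolution", "WonderSwan": "3d_revolution",
--     "PS2": "modern_classic", "GameCube": "modern_classic",
--     "Xbox": "modern_classic", "NDS": "modern_classic",
--     "PSP": "modern_classic", "Wii": "modern_classic",
--     "3DO": "3d_revolution", "Jaguar": "3d_revolution",
--     "Arcade": "retro_golden", "MAME": "retro_golden",
-- }
--
-- # Sorted boundary table: era i covers years in [start_i, start_{i+1}); last ends at 2025.
-- _BOUNDS = [
--     (1970, "retro_early"), (1985, "retro_golden"), (1993, "16bit_era"),
--     (1997, "3d_revolution"), (2002, "modern_classic"), (2011, "modern"),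
-- ]
--
-- def classify_era(year_str: str, system: str = "") -> str:
--     """Classify a game into an era based on year or system."""
--     if year_str:
--         try:
--             year = int(year_str[:4])
--         except ValueError:
--             year = None
--         if year is not None and 1970 <= year <= 2025:
--             # binary search for the rightmost boundary start <= year
--             lo, hi = 0, len(_BOUNDS)
--             while lo < hi:
--                 mid = (lo + hi) // 2
--                 if _BOUNDS[mid][0] <= year:
--                     lo = mid + 1
--                 else:
--                     hi = mid
--             return _BOUNDS[lo - 1][1]
--     return SYSTEM_GENERATIONS.get(system, "unknown")
-- ===== Notes on version B (the rewrite author's own statement) =====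
-- stated objective: alternative
-- what changed: Replaces the linear scan over the six ERA_RANGES entries by a hand-written bisect-right binary search over a sorted (start, era) boundary table, with a single range check 1970<=year<=2025 before indexing; the parse fallback and SYSTEM_GENERATIONS lookup are unchanged.
import Mathlib
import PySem

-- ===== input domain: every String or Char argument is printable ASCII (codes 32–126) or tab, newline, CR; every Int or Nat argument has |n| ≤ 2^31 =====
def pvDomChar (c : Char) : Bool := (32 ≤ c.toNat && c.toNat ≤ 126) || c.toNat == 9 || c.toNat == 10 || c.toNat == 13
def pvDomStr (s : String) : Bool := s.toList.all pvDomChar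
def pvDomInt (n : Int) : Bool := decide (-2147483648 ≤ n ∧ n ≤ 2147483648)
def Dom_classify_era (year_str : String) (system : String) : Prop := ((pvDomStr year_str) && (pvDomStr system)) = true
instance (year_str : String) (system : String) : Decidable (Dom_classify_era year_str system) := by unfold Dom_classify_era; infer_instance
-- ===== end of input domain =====

-- B replaces the linear scan over the six ERA_RANGES entries by a binary search on a
-- sorted (start, era) boundary table; objective: alternative (idiomatic bisect-style lookup).

-- ===== PORT A =====
def SYSTEM_GENERATIONS : PySem.Dict String String := PySem.Dict.ofList [
  ("Atari 2600", "retro_early"), ("Atari 5200", "retro_early"),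
  ("ColecoVision", "retro_early"), ("Intellivision", "retro_early"),
  ("NES", "retro_golden"), ("Master System", "retro_golden"),
  ("Game Boy", "retro_golden"), ("Atari 7800", "retro_golden"),
  ("SNES", "16bit_era"), ("Genesis", "16bit_era"), ("Mega Drive", "16bit_era"),
  ("TurboGrafx-16", "16bit_era"), ("Neo Geo", "16bit_era"),
  ("Game Boy Color", "16bit_era"), ("Game Gear", "16bit_era"),
  ("Sega CD", "16bit_era"), ("Atari Lynx", "16bit_era"),
  ("PlayStation", "3d_revolution"), ("N64", "3d_revolution"),
  ("Saturn", "3d_revolution"), ("Dreamcast", "3d_revolution"),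
  ("GBA", "3d_revolution"), ("WonderSwan", "3d_revolution"),
  ("PS2", "modern_classic"), ("GameCube", "modern_classic"),
  ("Xbox", "modern_classic"), ("NDS", "modern_classic"),
  ("PSP", "modern_classic"), ("Wii", "modern_classic"),
  ("3DO", "3d_revolution"), ("Jaguar", "3d_revolution"),
  ("Arcade", "retro_golden"), ("MAME", "retro_golden")]

def ERA_RANGES : List (String × Int × Int) := [
  ("retro_early", 1970, 1984), ("retro_golden", 1985, 1992),
  ("16bit_era", 1993, 1996), ("3d_revolution", 1997, 2001),
  ("modern_classic", 2002, 2010), ("modern", 2011, 2025)]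

-- the for-loop over ERA_RANGES.items(): first matching era, else fall through
def eraLoop (ranges : List (String × Int × Int)) (year : Int) (fallback : String) : String :=
  match ranges with
  | [] => fallback
  | (era, start, stop) :: rest =>
      if start ≤ year ∧ year ≤ stop then era else eraLoop rest year fallback

def classify_era (year_str : String) (system : String) : String :=
  let fallback := SYSTEM_GENERATIONS.getD system "unknown"
  if year_str.toList ≠ [] then
    -- int(year_str[:4]); none = ValueError, caught by the except → fallback
    match PySem.Int.ofChars? (PySem.List.slice year_str.toList none (some 4)) with
    | some year => eraLoop ERA_RANGES year fallback
    | none => fallback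
  else fallback

-- ===== PORT B =====
-- sorted boundary table from Source B
def eraBounds : List (Int × String) := [
  (1970, "retro_early"), (1985, "retro_golden"), (1993, "16bit_era"),
  (1997, "3d_revolution"), (2002, "modern_classic"), (2011, "modern")]

-- the while lo < hi binary search from Source B (rightmost start <= year)
def bsearchHi (year : Int) (lo hi : Nat) : Nat :=
  if lo < hi then
    let mid := (lo + hi) / 2
    if (eraBounds.getD mid (0, "")).1 ≤ year then bsearchHi year (mid + 1) hi
    else bsearchHi year lo mid
  else lo
termination_by hi - lo
decreasing_by all_goals omega

def classify_era_alt (year_str : String) (system : String) : String :=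
  if year_str.toList ≠ [] then
    match PySem.Int.ofChars? (PySem.List.slice year_str.toList none (some 4)) with
    | some year =>
        if 1970 ≤ year ∧ year ≤ 2025 then
          (eraBounds.getD (bsearchHi year 0 eraBounds.length - 1) (0, "")).2
        else SYSTEM_GENERATIONS.getD system "unknown"
    | none => SYSTEM_GENERATIONS.getD system "unknown"
  else SYSTEM_GENERATIONS.getD system "unknown"

-- ===== PRECONDITION & SPEC =====
def Spec_classify_era (year_str : String) (system : String) (out : String) : Prop := out = classify_era_alt year_str system
instance (year_str : String) (system : String) (out : String) : Decidable (Spec_classify_era year_str system out) := by unfold Spec_classify_era; infer_instance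

-- ===== CLAIM (what is proved, stated in full; the proofs are below) =====
def Claim_equal_classify_era : Prop := ∀ (year_str : String) (system : String), Dom_classify_era year_str system → Spec_classify_era year_str system (classify_era year_str system)

-- ===== LEMMAS AND PROOFS =====

-- The core agreement: for any parsed year, A's scan and B's binary-search branch coincide.
theorem eraLoop_eq_bsearch (year : Int) (fb : String) :
    eraLoop ERA_RANGES year fb =
      (if 1970 ≤ year ∧ year ≤ 2025 then
        (eraBounds.getD (bsearchHi year 0 eraBounds.length - 1) (0, "")).2
      else fb) := by
  simp only [eraLoop, ERA_RANGES]
  simp [bsearchHi.eq_def, eraBounds]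
  split_ifs <;> first | rfl | omega

theorem classify_era_spec' (year_str : String) (system : String) :
    classify_era year_str system = classify_era_alt year_str system := by
  unfold classify_era classify_era_alt
  split_ifs with h
  · cases PySem.Int.ofChars? (PySem.List.slice year_str.toList none (some 4)) with
    | none => rfl
    | some y => exact eraLoop_eq_bsearch y _
  · rfl

-- ===== VERDICT (by name: the statement is the Claim_ definition above) =====
theorem classify_era_spec : Claim_equal_classify_era := by
  intro ys s _
  exact classify_era_spec' ys s
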